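-- pv_equiv track=rewrite | github.com/huangziwei/nik | nik/tts.py | _int_to_kana
-- ===== SOURCE A (Python) =====
-- from typing import Any, Dict, List, Optional, Sequence, Tuple
--
-- _DIGIT_KANA = {
--     "0": "ゼロ",
--     "1": "いち",
--     "2": "に",
--     "3": "さん",
--     "4": "よん",
--     "5": "ご",
--     "6": "ろく",
--     "7": "なな",
--     "8": "はち",
--     "9": "きゅう",
-- }
--
-- _KANA_DIGITS = {
--     1: "いち",
--     2: "に",
--     3: "さん",
--     4: "よん",
--     5: "ご",
--     6: "ろく",
--     7: "なな",
--     8: "はち",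
--     9: "きゅう",
-- }
--
-- def _digit_seq_to_kana(seq: str) -> str:
--     if not seq:
--         return seq
--     return "".join(_DIGIT_KANA.get(ch, ch) for ch in seq)
--
-- def _group_to_kana(value: int) -> str:
--     if value <= 0:
--         return ""
--     out: List[str] = []
--     thousands = value // 1000
--     hundreds = (value // 100) % 10
--     tens = (value // 10) % 10
--     ones = value % 10
--     if thousands:
--         if thousands == 1:
--             out.append("せん")
--         elif thousands == 3:
--             out.append("さんぜん")
--         elif thousands == 8:
--             out.append("はっせん")
--         else:
--             out.append(f"{_KANA_DIGITS[thousands]}せん")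
--     if hundreds:
--         if hundreds == 1:
--             out.append("ひゃく")
--         elif hundreds == 3:
--             out.append("さんびゃく")
--         elif hundreds == 6:
--             out.append("ろっぴゃく")
--         elif hundreds == 8:
--             out.append("はっぴゃく")
--         else:
--             out.append(f"{_KANA_DIGITS[hundreds]}ひゃく")
--     if tens:
--         if tens == 1:
--             out.append("じゅう")
--         else:
--             out.append(f"{_KANA_DIGITS[tens]}じゅう")
--     if ones:
--         out.append(_KANA_DIGITS[ones])
--     return "".join(out)
--
-- def _int_to_kana(value: int) -> str:
--     if value == 0:
--         return "ぜろ"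
--     out: List[str] = []
--     group_index = 0
--     n = value
--     big_units = ["", "まん", "おく", "ちょう", "けい"]
--     while n > 0 and group_index < len(big_units):
--         group = n % 10000
--         if group:
--             part = _group_to_kana(group)
--             unit = big_units[group_index]
--             out.append(f"{part}{unit}" if unit else part)
--         n //= 10000
--         group_index += 1
--     if n > 0:
--         return _digit_seq_to_kana(str(value))
--     return "".join(reversed(out))
-- ===== SOURCE B (Python) =====
-- from typing import List, Optional, Tuple
--
-- _DIGIT_KANA = {
--     "0": "ゼロ", "1": "いち", "2": "に", "3": "さん", "4": "よん",
--     "5": "ご", "6": "ろく", "7": "なな", "8": "はち", "9": "きゅう",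
-- }
--
-- _ONES = {1: "いち", 2: "に", 3: "さん", 4: "よん", 5: "ご",
--          6: "ろく", 7: "なな", 8: "はち", 9: "きゅう"}
--
-- # one descending table mixing big (named recursively) and small (single-digit) units
-- _UNITS: List[Tuple[int, str]] = [
--     (10 ** 16, "けい"), (10 ** 12, "ちょう"), (10 ** 8, "おく"), (10 ** 4, "まん"),
--     (1000, "せん"), (100, "ひゃく"), (10, "じゅう"),
-- ]
--
-- _EUPHONIC = {(3, "せん"): "さんぜん", (8, "せん"): "はっせん",
--              (3, "ひゃく"): "さんびゃく", (6, "ひゃく"): "ろっぴゃく",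
--              (8, "ひゃく"): "はっぴゃく"}
--
--
-- def _render(v: int, units: List[Tuple[int, str]]) -> str:
--     # recursive descent over the unit table: quotient prefix + unit name + remainder
--     if v == 0:
--         return ""
--     if not units:
--         return _ONES[v]
--     base, name = units[0]
--     q, r = divmod(v, base)
--     head = ""
--     if q:
--         if base >= 10 ** 4:
--             head = _render(q, units[1:]) + name
--         else:
--             head = _EUPHONIC.get((q, name)) or (("" if q == 1 else _ONES[q]) + name)
--     return head + _render(r, units[1:])
--
--
-- def _int_to_kana(value: int) -> str:
--     if value == 0:
--         return "ぜろ"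
--     if value < 0:
--         return ""
--     if value >= 10 ** 20:
--         return "".join(_DIGIT_KANA[ch] for ch in str(value))
--     return _render(value, _UNITS)
-- ===== Notes on version B (the rewrite author's own statement) =====
-- stated objective: alternative
-- what changed: B abandons A's split into four-digit groups (while-loop collecting group strings LSB-first, per-group digit-branch function, final reversal) for a single recursive descent over one descending unit-value table mixing big and small units: at each unit it takes divmod(v, base), renders the quotient (recursively for big units, as one digit with a euphonic lookup for small ones) and recurses on the remainder, so there is no grouping, no list accumulator and no reversal.
import Mathlib
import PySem

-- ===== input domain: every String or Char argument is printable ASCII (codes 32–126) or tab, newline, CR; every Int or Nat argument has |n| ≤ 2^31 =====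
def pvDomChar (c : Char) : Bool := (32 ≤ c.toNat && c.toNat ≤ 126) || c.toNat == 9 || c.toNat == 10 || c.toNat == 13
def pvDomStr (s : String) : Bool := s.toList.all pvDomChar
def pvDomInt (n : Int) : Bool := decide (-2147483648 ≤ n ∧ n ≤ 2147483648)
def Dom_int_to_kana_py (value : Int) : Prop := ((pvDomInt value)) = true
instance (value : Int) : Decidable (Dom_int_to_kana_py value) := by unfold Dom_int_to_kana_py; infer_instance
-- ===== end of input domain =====

-- B replaces A's four-digit-group while-loop (LSB-first list + reversal, per-group branch chains) by a
-- recursive descent over one descending unit-value table with divmod at each unit (objective: alternative).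

-- ===== PORT A =====

-- _DIGIT_KANA.get(ch, ch): the dict lookup with default, ported as a branch table
def digitKanaGetA (c : Char) : String :=
  if c = '0' then "ゼロ" else if c = '1' then "いち" else if c = '2' then "に" else if c = '3' then "さん"
  else if c = '4' then "よん" else if c = '5' then "ご" else if c = '6' then "ろく" else if c = '7' then "なな"
  else if c = '8' then "はち" else if c = '9' then "きゅう" else String.ofList [c]

def digitSeqToKanaA (seq : String) : String :=
  if seq = "" then seq else PySem.Str.join "" (seq.toList.map digitKanaGetA)

-- _KANA_DIGITS[k]: dict lookup ported as a branch table ("" on the KeyError keys, unreachable at call sites)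
def kanaDigitsA (k : Int) : String :=
  if k = 1 then "いち" else if k = 2 then "に" else if k = 3 then "さん" else if k = 4 then "よん" else if k = 5 then "ご"
  else if k = 6 then "ろく" else if k = 7 then "なな" else if k = 8 then "はち" else if k = 9 then "きゅう" else ""

def groupToKanaA (value : Int) : String :=
  if value ≤ 0 then "" else
  let thousands := PySem.Int.floordiv value 1000
  let hundreds := PySem.Int.mod (PySem.Int.floordiv value 100) 10
  let tens := PySem.Int.mod (PySem.Int.floordiv value 10) 10
  let ones := PySem.Int.mod value 10
  let out : List String := []
  let out := if thousands ≠ 0 then out ++ [if thousands = 1 then "せん" else if thousands = 3 then "さんぜん" else if thousands = 8 then "はっせん" else kanaDigitsA thousands ++ "せん"] else out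
  let out := if hundreds ≠ 0 then out ++ [if hundreds = 1 then "ひゃく" else if hundreds = 3 then "さんびゃく" else if hundreds = 6 then "ろっぴゃく" else if hundreds = 8 then "はっぴゃく" else kanaDigitsA hundreds ++ "ひゃく"] else out
  let out := if tens ≠ 0 then out ++ [if tens = 1 then "じゅう" else kanaDigitsA tens ++ "じゅう"] else out
  let out := if ones ≠ 0 then out ++ [kanaDigitsA ones] else out
  PySem.Str.join "" out

def bigUnitsA : List String := ["", "まん", "おく", "ちょう", "けい"]

-- the while loop: `while n > 0 and group_index < len(big_units)`
def intToKanaLoopA (n : Int) (gi : Nat) (out : List String) : List String × Int :=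
  if n > 0 ∧ gi < bigUnitsA.length then
    let group := PySem.Int.mod n 10000
    let out := if group ≠ 0 then
        let part := groupToKanaA group
        let unit := PySem.List.pyGetD bigUnitsA (gi : Int) ""
        out ++ [if unit ≠ "" then part ++ unit else part]
      else out
    intToKanaLoopA (PySem.Int.floordiv n 10000) (gi + 1) out
  else (out, n)
termination_by bigUnitsA.length - gi
decreasing_by simp [bigUnitsA] at *; omega

def int_to_kana_py (value : Int) : String :=
  if value = 0 then "ぜろ" else
  let r := intToKanaLoopA value 0 []
  if r.2 > 0 then digitSeqToKanaA (PySem.Int.toStr value)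
  else PySem.Str.join "" r.1.reverse

-- ===== PORT B =====

-- _DIGIT_KANA[ch]: dict lookup ported as a branch table (KeyError unreachable: ch is a digit of str(value))
def digitKanaB (c : Char) : String :=
  if c = '0' then "ゼロ" else if c = '1' then "いち" else if c = '2' then "に" else if c = '3' then "さん"
  else if c = '4' then "よん" else if c = '5' then "ご" else if c = '6' then "ろく" else if c = '7' then "なな"
  else if c = '8' then "はち" else if c = '9' then "きゅう" else ""

-- _ONES[v]: dict lookup as a branch table ("" = unreachable KeyError)
def onesB (v : Int) : String :=
  if v = 1 then "いち" else if v = 2 then "に" else if v = 3 then "さん" else if v = 4 then "よん" else if v = 5 then "ご"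
  else if v = 6 then "ろく" else if v = 7 then "なな" else if v = 8 then "はち" else if v = 9 then "きゅう" else ""

-- _EUPHONIC.get((q, name)): dict lookup as a branch table; `x or y` = Option.getD since all values are nonempty
def euphB (q : Int) (name : String) : Option String :=
  if q = 3 ∧ name = "せん" then some "さんぜん"
  else if q = 8 ∧ name = "せん" then some "はっせん"
  else if q = 3 ∧ name = "ひゃく" then some "さんびゃく"
  else if q = 6 ∧ name = "ひゃく" then some "ろっぴゃく"
  else if q = 8 ∧ name = "ひゃく" then some "はっぴゃく"
  else none

def unitsB : List (Int × String) :=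
  [(10 ^ 16, "けい"), (10 ^ 12, "ちょう"), (10 ^ 8, "おく"), (10 ^ 4, "まん"),
   (1000, "せん"), (100, "ひゃく"), (10, "じゅう")]

def renderB : Int → List (Int × String) → String
  | v, [] => if v = 0 then "" else onesB v
  | v, (base, name) :: rest =>
    if v = 0 then "" else
    let q := PySem.Int.floordiv v base
    let r := PySem.Int.mod v base
    let head :=
      if q ≠ 0 then
        if base ≥ 10 ^ 4 then renderB q rest ++ name
        else (euphB q name).getD ((if q = 1 then "" else onesB q) ++ name)
      else ""
    head ++ renderB r rest

def int_to_kana_py_alt (value : Int) : String :=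
  if value = 0 then "ぜろ" else
  if value < 0 then "" else
  if value ≥ 10 ^ 20 then PySem.Str.join "" ((PySem.Int.toStr value).toList.map digitKanaB) else
  renderB value unitsB

-- ===== PRECONDITION & SPEC =====
def Spec_int_to_kana_py (value : Int) (out : String) : Prop := out = int_to_kana_py_alt value
instance (value : Int) (out : String) : Decidable (Spec_int_to_kana_py value out) := by unfold Spec_int_to_kana_py; infer_instance

-- ===== CLAIM (what is proved, stated in full; the proofs are below) =====
def Claim_equal_int_to_kana_py : Prop := ∀ (value : Int), Dom_int_to_kana_py value → Spec_int_to_kana_py value (int_to_kana_py value)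

-- ===== LEMMAS AND PROOFS =====

-- digit-position tables, PROOF-ONLY common form both sides are reduced to
def senT : List String := ["", "せん", "にせん", "さんぜん", "よんせん", "ごせん", "ろくせん", "ななせん", "はっせん", "きゅうせん"]
def hyakuT : List String := ["", "ひゃく", "にひゃく", "さんびゃく", "よんひゃく", "ごひゃく", "ろっぴゃく", "ななひゃく", "はっぴゃく", "きゅうひゃく"]
def juuT : List String := ["", "じゅう", "にじゅう", "さんじゅう", "よんじゅう", "ごじゅう", "ろくじゅう", "ななじゅう", "はちじゅう", "きゅうじゅう"]
def onesT : List String := ["", "いち", "に", "さん", "よん", "ご", "ろく", "なな", "はち", "きゅう"]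

def groupTbl (g : Int) : String :=
  PySem.List.pyGetD senT (g / 1000) "" ++ PySem.List.pyGetD hyakuT (g / 100 % 10) "" ++
  PySem.List.pyGetD juuT (g / 10 % 10) "" ++ PySem.List.pyGetD onesT (g % 10) ""

lemma chars_join_nil (ps : List (List Char)) : PySem.Chars.join [] ps = ps.flatten := by
  induction ps with
  | nil => simp [PySem.Chars.join_nil]
  | cons p rest ih =>
    cases rest with
    | nil => simp [PySem.Chars.join_singleton]
    | cons q r => simp [PySem.Chars.join_cons_cons, ih]

lemma str_join_empty_toList (ps : List String) :
    (PySem.Str.join "" ps).toList = (ps.map String.toList).flatten := by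
  simp [PySem.Str.join, chars_join_nil]

lemma pieceSen (a : Int) (h : 0 ≤ a) (h9 : a ≤ 9) :
    ((if a ≠ 0 then [if a = 1 then "せん" else if a = 3 then "さんぜん" else if a = 8 then "はっせん" else kanaDigitsA a ++ "せん"] else ([]:List String)).map String.toList).flatten
      = (PySem.List.pyGetD senT a "").toList := by
  interval_cases a <;> decide

lemma pieceHyaku (a : Int) (h : 0 ≤ a) (h9 : a ≤ 9) :
    ((if a ≠ 0 then [if a = 1 then "ひゃく" else if a = 3 then "さんびゃく" else if a = 6 then "ろっぴゃく" else if a = 8 then "はっぴゃく" else kanaDigitsA a ++ "ひゃく"] else ([]:List String)).map String.toList).flatten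
      = (PySem.List.pyGetD hyakuT a "").toList := by
  interval_cases a <;> decide

lemma pieceJuu (a : Int) (h : 0 ≤ a) (h9 : a ≤ 9) :
    ((if a ≠ 0 then [if a = 1 then "じゅう" else kanaDigitsA a ++ "じゅう"] else ([]:List String)).map String.toList).flatten
      = (PySem.List.pyGetD juuT a "").toList := by
  interval_cases a <;> decide

lemma pieceOnes (a : Int) (h : 0 ≤ a) (h9 : a ≤ 9) :
    ((if a ≠ 0 then [kanaDigitsA a] else ([]:List String)).map String.toList).flatten
      = (PySem.List.pyGetD onesT a "").toList := by
  interval_cases a <;> decide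

lemma append_if_singleton {α : Type} (c : Prop) [Decidable c] (l : List α) (x : α) :
    (if c then l ++ [x] else l) = l ++ (if c then [x] else []) := by split_ifs <;> simp

-- A's per-group function equals the table form
lemma groupA_eq_tbl (g : Int) (h0 : 0 ≤ g) (h1 : g < 10000) : groupToKanaA g = groupTbl g := by
  have e1 : PySem.Int.floordiv g 1000 = g / 1000 := PySem.Int.floordiv_eq_ediv_of_pos (by norm_num)
  have e2 : PySem.Int.floordiv g 100 = g / 100 := PySem.Int.floordiv_eq_ediv_of_pos (by norm_num)
  have e3 : PySem.Int.floordiv g 10 = g / 10 := PySem.Int.floordiv_eq_ediv_of_pos (by norm_num)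
  have m1 : ∀ x : Int, PySem.Int.mod x 10 = x % 10 := fun x => PySem.Int.mod_eq_emod_of_pos (by norm_num)
  by_cases hg : g ≤ 0
  · have : g = 0 := le_antisymm hg h0
    subst this; decide
  · unfold groupToKanaA groupTbl
    rw [if_neg hg]
    simp only [e1, e2, e3, m1, append_if_singleton]
    rw [← String.toList_inj]
    simp only [str_join_empty_toList, String.toList_append, List.nil_append,
      List.map_append, List.flatten_append]
    rw [pieceSen _ (by omega) (by omega), pieceHyaku _ (by omega) (by omega),
      pieceJuu _ (by omega) (by omega), pieceOnes _ (by omega) (by omega)]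

-- ----- B side: the recursive descent reduces to the same table form -----

lemma render_zero (units : List (Int × String)) : renderB 0 units = "" := by
  cases units with
  | nil => simp [renderB]
  | cons u rest => obtain ⟨b, n⟩ := u; simp [renderB]

lemma headJuu (q : Int) (h0 : 0 ≤ q) (h9 : q ≤ 9) :
    (if q ≠ 0 then (euphB q "じゅう").getD ((if q = 1 then "" else onesB q) ++ "じゅう") else "")
      = PySem.List.pyGetD juuT q "" := by
  interval_cases q <;> decide

lemma headHyaku (q : Int) (h0 : 0 ≤ q) (h9 : q ≤ 9) :
    (if q ≠ 0 then (euphB q "ひゃく").getD ((if q = 1 then "" else onesB q) ++ "ひゃく") else "")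
      = PySem.List.pyGetD hyakuT q "" := by
  interval_cases q <;> decide

lemma headSen (q : Int) (h0 : 0 ≤ q) (h9 : q ≤ 9) :
    (if q ≠ 0 then (euphB q "せん").getD ((if q = 1 then "" else onesB q) ++ "せん") else "")
      = PySem.List.pyGetD senT q "" := by
  interval_cases q <;> decide

lemma renderOnes (g : Int) (h0 : 0 ≤ g) (h1 : g < 10) :
    renderB g [] = PySem.List.pyGetD onesT g "" := by
  interval_cases g <;> decide

lemma renderJuu (g : Int) (h0 : 0 ≤ g) (h1 : g < 100) :
    renderB g [(10, "じゅう")] = PySem.List.pyGetD juuT (g / 10) "" ++ PySem.List.pyGetD onesT (g % 10) "" := by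
  by_cases hg : g = 0
  · subst hg; decide
  · rw [renderB, if_neg hg]
    simp only [PySem.Int.floordiv_eq_ediv_of_pos (show (0:Int) < 10 by norm_num),
      PySem.Int.mod_eq_emod_of_pos (show (0:Int) < 10 by norm_num)]
    rw [if_neg (show ¬ ((10:Int) ≥ 10 ^ 4) from by norm_num)]
    rw [headJuu (g / 10) (by omega) (by omega), renderOnes (g % 10) (by omega) (by omega)]

lemma renderHyaku (g : Int) (h0 : 0 ≤ g) (h1 : g < 1000) :
    renderB g [(100, "ひゃく"), (10, "じゅう")]
      = PySem.List.pyGetD hyakuT (g / 100) "" ++ PySem.List.pyGetD juuT (g / 10 % 10) ""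
        ++ PySem.List.pyGetD onesT (g % 10) "" := by
  by_cases hg : g = 0
  · subst hg; decide
  · rw [renderB, if_neg hg]
    simp only [PySem.Int.floordiv_eq_ediv_of_pos (show (0:Int) < 100 by norm_num),
      PySem.Int.mod_eq_emod_of_pos (show (0:Int) < 100 by norm_num)]
    rw [if_neg (show ¬ ((100:Int) ≥ 10 ^ 4) from by norm_num)]
    rw [headHyaku (g / 100) (by omega) (by omega), renderJuu (g % 100) (by omega) (by omega)]
    rw [show g % 100 / 10 = g / 10 % 10 from by omega, show g % 100 % 10 = g % 10 from by omega]
    simp [String.append_assoc]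

lemma renderSmall (g : Int) (h0 : 0 ≤ g) (h1 : g < 10000) :
    renderB g [(1000, "せん"), (100, "ひゃく"), (10, "じゅう")] = groupTbl g := by
  by_cases hg : g = 0
  · subst hg; decide
  · rw [renderB, if_neg hg]
    simp only [PySem.Int.floordiv_eq_ediv_of_pos (show (0:Int) < 1000 by norm_num),
      PySem.Int.mod_eq_emod_of_pos (show (0:Int) < 1000 by norm_num)]
    rw [if_neg (show ¬ ((1000:Int) ≥ 10 ^ 4) from by norm_num)]
    rw [headSen (g / 1000) (by omega) (by omega), renderHyaku (g % 1000) (by omega) (by omega)]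
    rw [show g % 1000 / 100 = g / 100 % 10 from by omega, show g % 1000 / 10 % 10 = g / 10 % 10 from by omega,
      show g % 1000 % 10 = g % 10 from by omega]
    unfold groupTbl
    simp [String.append_assoc]

lemma skipBig (v base : Int) (name : String) (rest : List (Int × String))
    (h0 : 0 ≤ v) (h1 : v < base) : renderB v ((base, name) :: rest) = renderB v rest := by
  by_cases hv : v = 0
  · subst hv; rw [render_zero, render_zero]
  · rw [renderB, if_neg hv]
    have hq : PySem.Int.floordiv v base = 0 := by
      rw [PySem.Int.floordiv_eq_ediv_of_pos (by omega)]
      exact Int.ediv_eq_zero_of_lt h0 h1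
    have hr : PySem.Int.mod v base = v := by
      rw [PySem.Int.mod_eq_emod_of_pos (by omega)]
      exact Int.emod_eq_of_lt h0 h1
    simp only [hq, hr, ne_eq, not_true_eq_false, ite_false]
    simp

lemma renderFull (v : Int) (h0 : 0 < v) (h1 : v ≤ 2147483648) :
    renderB v unitsB
      = (if v / 100000000 ≠ 0 then groupTbl (v / 100000000) ++ "おく" else "")
        ++ (if v / 10000 % 10000 ≠ 0 then groupTbl (v / 10000 % 10000) ++ "まん" else "")
        ++ groupTbl (v % 10000) := by
  unfold unitsB
  rw [show ((10:Int) ^ 16) = 10000000000000000 from by norm_num,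
    show ((10:Int) ^ 12) = 1000000000000 from by norm_num,
    show ((10:Int) ^ 8) = 100000000 from by norm_num,
    show ((10:Int) ^ 4) = 10000 from by norm_num]
  rw [skipBig _ _ _ _ (by omega) (by omega), skipBig _ _ _ _ (by omega) (by omega)]
  rw [renderB, if_neg (show ¬ v = 0 by omega)]
  simp only [PySem.Int.floordiv_eq_ediv_of_pos (show (0:Int) < 100000000 by norm_num),
    PySem.Int.mod_eq_emod_of_pos (show (0:Int) < 100000000 by norm_num)]
  have hman : renderB (v % 100000000) [(10000, "まん"), (1000, "せん"), (100, "ひゃく"), (10, "じゅう")]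
      = (if v / 10000 % 10000 ≠ 0 then groupTbl (v / 10000 % 10000) ++ "まん" else "")
        ++ groupTbl (v % 10000) := by
    by_cases hr : v % 100000000 = 0
    · rw [hr, render_zero]
      rw [show v / 10000 % 10000 = 0 from by omega, show v % 10000 = 0 from by omega]
      have hz : groupTbl 0 = "" := by decide
      simp [hz]
    · rw [renderB, if_neg hr]
      simp only [PySem.Int.floordiv_eq_ediv_of_pos (show (0:Int) < 10000 by norm_num),
        PySem.Int.mod_eq_emod_of_pos (show (0:Int) < 10000 by norm_num)]
      rw [show v % 100000000 / 10000 = v / 10000 % 10000 from by omega,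
        show v % 100000000 % 10000 = v % 10000 from by omega,
        renderSmall (v % 10000) (by omega) (by omega)]
      by_cases hq : v / 10000 % 10000 = 0
      · simp [hq]
      · rw [if_pos hq, if_pos hq, if_pos (show (10000:Int) ≥ 10 ^ 4 from by norm_num),
          renderSmall (v / 10000 % 10000) (by omega) (by omega)]
  rw [hman]
  by_cases hq2 : v / 100000000 = 0
  · simp [hq2]
  · rw [if_pos hq2, if_pos hq2, if_pos (show (100000000:Int) ≥ 10 ^ 4 from by norm_num),
      skipBig (v / 100000000) 10000 "まん" _ (by omega) (by omega),
      renderSmall (v / 100000000) (by omega) (by omega)]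
    simp [String.append_assoc]

-- ----- A side: the loop's closed form (three groups suffice for v < 10^12) -----

def pack (g : Int) (u : String) : List String :=
  if g ≠ 0 then [if u ≠ "" then groupToKanaA g ++ u else groupToKanaA g] else []

lemma loop_step (n : Int) (gi : Nat) (out : List String) (hn : 0 < n) (hgi : gi < 5) :
    intToKanaLoopA n gi out =
      intToKanaLoopA (n / 10000) (gi + 1) (out ++ pack (n % 10000) (bigUnitsA.getD gi "")) := by
  rw [intToKanaLoopA, if_pos ⟨hn, by simpa [bigUnitsA] using hgi⟩]
  simp only [PySem.Int.mod_eq_emod_of_pos (show (0:Int) < 10000 by norm_num),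
    PySem.Int.floordiv_eq_ediv_of_pos (show (0:Int) < 10000 by norm_num),
    PySem.List.pyGetD_natCast, pack]
  rw [append_if_singleton]

lemma loop_exit (n : Int) (gi : Nat) (out : List String) (hn : ¬ n > 0) :
    intToKanaLoopA n gi out = (out, n) := by
  rw [intToKanaLoopA, if_neg (by rintro ⟨h, -⟩; exact hn h)]

lemma loopA_char (v : Int) (h0 : 0 < v) (h1 : v < 1000000000000) :
    intToKanaLoopA v 0 [] =
      (pack (v % 10000) "" ++ pack (v / 10000 % 10000) "まん" ++ pack (v / 100000000 % 10000) "おく", 0) := by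
  have u0 : bigUnitsA.getD 0 "" = "" := by decide
  have u1 : bigUnitsA.getD 1 "" = "まん" := by decide
  have u2 : bigUnitsA.getD 2 "" = "おく" := by decide
  rw [loop_step v 0 [] h0 (by norm_num), u0]
  by_cases ha : v / 10000 = 0
  · rw [loop_exit _ _ _ (by omega)]
    have hb : v / 10000 % 10000 = 0 := by rw [ha]; rfl
    have hc : v / 100000000 % 10000 = 0 := by
      have : v / 100000000 = 0 := by omega
      rw [this]; rfl
    simp [pack, hc, ha]
  · rw [loop_step _ _ _ (by omega) (by norm_num), u1]
    by_cases hb : v / 10000 / 10000 = 0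
    · rw [loop_exit _ _ _ (by omega)]
      have e8 : v / 100000000 = v / 10000 / 10000 := by omega
      have hc : v / 100000000 % 10000 = 0 := by rw [e8, hb]; rfl
      simp [pack, hc]
      exact hb
    · rw [loop_step _ _ _ (by omega) (by norm_num), u2]
      rw [loop_exit _ _ _ (by omega)]
      have e8 : v / 100000000 = v / 10000 / 10000 := by omega
      have hm : v / 10000 / 10000 % 10000 = v / 10000 / 10000 := by omega
      have hz : v / 10000 / 10000 / 10000 = 0 := by omega
      rw [hm, hz]
      rw [e8, hm]
      simp

lemma pack_reverse (g : Int) (u : String) : (pack g u).reverse = pack g u := by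
  unfold pack; split_ifs <;> rfl

lemma pack_toList (g : Int) (u : String) (h0 : 0 ≤ g) (h1 : g < 10000) :
    ((pack g u).map String.toList).flatten = (if g ≠ 0 then (groupTbl g ++ u).toList else []) := by
  unfold pack
  split_ifs with hg hu
  · simp [groupA_eq_tbl g h0 h1]
  · have hu' : u = "" := not_ne_iff.mp hu
    subst hu'
    simp [groupA_eq_tbl g h0 h1]
  · rfl

lemma main_pos (v : Int) (h0 : 0 < v) (h1 : v ≤ 2147483648) :
    int_to_kana_py v = int_to_kana_py_alt v := by
  unfold int_to_kana_py
  rw [if_neg (show ¬ v = 0 by omega)]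
  rw [loopA_char v h0 (by omega)]
  rw [if_neg (by norm_num)]
  unfold int_to_kana_py_alt
  rw [if_neg (show ¬ v = 0 by omega), if_neg (by omega), if_neg (by omega)]
  rw [renderFull v h0 h1]
  rw [show v / 100000000 % 10000 = v / 100000000 from by omega]
  rw [← String.toList_inj]
  simp only [List.reverse_append, pack_reverse, str_join_empty_toList, List.map_append,
    List.flatten_append, String.toList_append]
  rw [pack_toList _ _ (by omega) (by omega), pack_toList _ _ (by omega) (by omega),
    pack_toList _ _ (by omega) (by omega)]
  have hz : groupTbl 0 = "" := by decide
  by_cases h2 : v / 100000000 = 0 <;> by_cases hm : v / 10000 % 10000 = 0 <;>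
    by_cases hl : v % 10000 = 0 <;>
    simp [h2, hm, hl, hz, String.toList_append]

-- ===== VERDICT (by name: the statement is the Claim_ definition above) =====
theorem int_to_kana_py_spec : Claim_equal_int_to_kana_py := by
  intro value hdom
  unfold Spec_int_to_kana_py
  rcases lt_trichotomy value 0 with hneg | hzero | hpos
  · -- negative: A's loop never runs, B returns "" at the guard
    have hA : int_to_kana_py value = "" := by
      unfold int_to_kana_py
      rw [if_neg (show ¬ value = 0 by omega)]
      rw [intToKanaLoopA]
      rw [if_neg (show ¬ (value > 0 ∧ 0 < bigUnitsA.length) from by rintro ⟨h, -⟩; omega)]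
      rw [if_neg (show ¬ ((([] : List String), value)).2 > 0 from by simpa using hneg.le)]
      simp only [List.reverse_nil]
      rfl
    have hB : int_to_kana_py_alt value = "" := by
      unfold int_to_kana_py_alt
      rw [if_neg (show ¬ value = 0 by omega), if_pos hneg]
    rw [hA, hB]
  · subst hzero; rfl
  · have hdom' : value ≤ 2147483648 := by
      simp [Dom_int_to_kana_py, pvDomInt] at hdom; omega
    exact main_pos value hpos hdom'
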